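-- pv_equiv track=rewrite | github.com/FrancoCastillo99/Progamacion1_UTN | funciones.py | numbers_less
-- ===== SOURCE A (Python) =====
-- def numbers_less(numbers,limit):
--     num_less =[]
--
--     numbers.sort()
--
--     num_less = numbers.copy()
--
--     for n in numbers:
--         if n > limit:
--             num_less.remove(n)
--
--     return num_less
-- ===== SOURCE B (Python) =====
-- def numbers_less(numbers, limit):
--     numbers.sort()
--     out = []
--     for n in numbers:
--         if n > limit:
--             break
--         out.append(n)
--     return out
-- ===== Notes on version B (the rewrite author's own statement) =====
-- stated objective: faster
-- what changed: Instead of copying the sorted list and calling list.remove for every element above the limit (each remove is a linear scan), B sorts once and collects the prefix of elements <= limit, stopping at the first element that exceeds it.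
import Mathlib
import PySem

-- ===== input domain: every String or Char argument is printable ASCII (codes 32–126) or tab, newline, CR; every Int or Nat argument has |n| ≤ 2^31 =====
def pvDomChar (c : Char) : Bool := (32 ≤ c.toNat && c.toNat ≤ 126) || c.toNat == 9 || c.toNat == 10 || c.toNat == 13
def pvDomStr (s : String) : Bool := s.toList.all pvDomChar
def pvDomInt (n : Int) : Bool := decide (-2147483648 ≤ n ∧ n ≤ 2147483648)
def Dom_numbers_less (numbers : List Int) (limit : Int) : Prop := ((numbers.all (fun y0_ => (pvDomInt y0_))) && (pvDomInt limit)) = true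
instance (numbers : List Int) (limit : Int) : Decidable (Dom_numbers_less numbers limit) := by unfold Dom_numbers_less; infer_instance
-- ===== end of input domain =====

-- B replaces A's copy-then-repeated-remove with sort + take-the-prefix ≤ limit (faster);
-- both A and B sort `numbers` in place — the theorems are about the return value.

-- ===== PORT A =====
-- num_less.remove(n): removes the first occurrence; the ValueError branch is unreachable
-- here (each n comes from the same sorted list and is removed at most once per occurrence),
-- so List.erase is exact: remove?_eq_some_erase applies at every iteration.
def numbers_less (numbers : List Int) (limit : Int) : List Int :=
  let s := PySem.List.sorted numbers (fun x => x) false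
  s.foldl (fun acc n => if n > limit then acc.erase n else acc) s

-- ===== PORT B =====
-- the for-loop with `break`: stop at the first element > limit
def bGo (limit : Int) : List Int → List Int
  | [] => []
  | n :: t => if n > limit then [] else n :: bGo limit t

def numbers_less_alt (numbers : List Int) (limit : Int) : List Int :=
  bGo limit (PySem.List.sorted numbers (fun x => x) false)

-- ===== PRECONDITION & SPEC =====
def Spec_numbers_less (numbers : List Int) (limit : Int) (out : List Int) : Prop := out = numbers_less_alt numbers limit
instance (numbers : List Int) (limit : Int) (out : List Int) : Decidable (Spec_numbers_less numbers limit out) := by unfold Spec_numbers_less; infer_instance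

-- ===== CLAIM (what is proved, stated in full; the proofs are below) =====
def Claim_equal_numbers_less : Prop := ∀ (numbers : List Int) (limit : Int), Dom_numbers_less numbers limit → Spec_numbers_less numbers limit (numbers_less numbers limit)

-- ===== LEMMAS AND PROOFS =====

-- folding removals over t keeps a head the loop never removes
theorem foldl_erase_cons (limit a : Int) (t : List Int)
    (h : ∀ n ∈ t, n > limit → n ≠ a) :
    ∀ l : List Int,
      t.foldl (fun acc n => if n > limit then acc.erase n else acc) (a :: l)
        = a :: t.foldl (fun acc n => if n > limit then acc.erase n else acc) l := by
  induction t with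
  | nil => intro l; rfl
  | cons x xs ih =>
    intro l
    have hx := h x (by simp)
    have htail : ∀ n ∈ xs, n > limit → n ≠ a := fun n hn => h n (by simp [hn])
    by_cases hgt : x > limit
    · have hne : a ≠ x := fun h => hx hgt h.symm
      simp only [List.foldl_cons, if_pos hgt, List.erase_cons]
      rw [if_neg (by simp [hne])]
      exact ih htail (l.erase x)
    · simp only [List.foldl_cons, if_neg hgt]
      exact ih htail l

-- A's loop, started on the very list it iterates, computes the filter
theorem foldl_erase_self (limit : Int) :
    ∀ s : List Int,
      s.foldl (fun acc n => if n > limit then acc.erase n else acc) s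
        = s.filter (fun n => decide (n ≤ limit)) := by
  intro s
  induction s with
  | nil => rfl
  | cons a t ih =>
    by_cases hgt : a > limit
    · simp only [List.foldl_cons, if_pos hgt, List.erase_cons_head, List.filter_cons,
        decide_eq_true_eq]
      rw [if_neg (by omega)]
      exact ih
    · simp only [List.foldl_cons, if_neg hgt, List.filter_cons, decide_eq_true_eq]
      rw [if_pos (by omega)]
      rw [foldl_erase_cons limit a t (fun n _ hn hna => hgt (hna ▸ hn))]
      exact congrArg (a :: ·) ih
  -- note: the inner foldl in the cons/¬hgt case starts from (a :: t); foldl_erase_cons peels a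

-- on a nondecreasing list, take-while-≤ equals filter-≤
theorem bGo_eq_filter (limit : Int) :
    ∀ s : List Int, s.Pairwise (fun x y => x ≤ y) →
      bGo limit s = s.filter (fun n => decide (n ≤ limit)) := by
  intro s
  induction s with
  | nil => intro _; rfl
  | cons a t ih =>
    intro hp
    rw [List.pairwise_cons] at hp
    by_cases hgt : a > limit
    · simp only [bGo, if_pos hgt, List.filter_cons, decide_eq_true_eq]
      rw [if_neg (by omega)]
      symm
      rw [List.filter_eq_nil_iff]
      intro n hn
      have := hp.1 n hn
      simp only [decide_eq_true_eq]
      omega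
    · simp only [bGo, if_neg hgt, List.filter_cons, decide_eq_true_eq]
      rw [if_pos (by omega)]
      exact congrArg (a :: ·) (ih hp.2)

-- ===== VERDICT (by name: the statement is the Claim_ definition above) =====
theorem numbers_less_spec : Claim_equal_numbers_less := by
  intro numbers limit _
  unfold Spec_numbers_less numbers_less numbers_less_alt
  rw [foldl_erase_self, bGo_eq_filter limit _ (PySem.List.sorted_pairwise numbers (fun x => x) )]
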